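-- pv_equiv track=rewrite | github.com/kjranyone/TMRVC | tmrvc-data/src/tmrvc_data/code_switch.py | _resolve_cjk_ambiguity
-- ===== SOURCE A (Python) =====
-- def _resolve_cjk_ambiguity(
--     char_langs: list[str | None],
--     text: str,
--     primary_language: str,
-- ) -> list[str | None]:
--     """Resolve "cjk" labels to a specific language (zh, ja, ko).
--
--     Heuristic rules:
--     1. If surrounded by Japanese-specific chars (hiragana/katakana), assign "ja".
--     2. If surrounded by Hangul, assign "ko" (rare in practice).
--     3. Otherwise, assign based on primary_language if it's zh/ja/ko.
--     4. Final fallback: "zh" (CJK ideographs are most commonly Chinese).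
--     """
--     resolved = list(char_langs)
--     n = len(resolved)
--
--     for i in range(n):
--         if resolved[i] != "cjk":
--             continue
--
--         # Look at neighboring classified characters
--         prev_lang = None
--         next_lang = None
--         for j in range(i - 1, -1, -1):
--             if resolved[j] is not None and resolved[j] != "cjk":
--                 prev_lang = resolved[j]
--                 break
--         for j in range(i + 1, n):
--             if resolved[j] is not None and resolved[j] != "cjk":
--                 next_lang = resolved[j]
--                 break
--
--         # Rule 1: surrounded by Japanese
--         if prev_lang == "ja" or next_lang == "ja":
--             resolved[i] = "ja"
--         # Rule 2: surrounded by Korean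
--         elif prev_lang == "ko" or next_lang == "ko":
--             resolved[i] = "ko"
--         # Rule 3: use primary language if CJK-capable
--         elif primary_language in ("zh", "ja", "ko"):
--             resolved[i] = primary_language
--         # Rule 4: default to Chinese
--         else:
--             resolved[i] = "zh"
--
--     return resolved
-- ===== SOURCE B (Python) =====
-- def _resolve_cjk_ambiguity(
--     char_langs: list,
--     text: str,
--     primary_language: str,
-- ) -> list:
--     """Alternative single-scan re-implementation: one backward pass precomputes
--     each position's next classified language; one forward pass carries the
--     previous resolved language while building the output."""
--     n = len(char_langs)
--     next_lang = [None] * n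
--     nxt = None
--     for i in range(n - 1, -1, -1):
--         next_lang[i] = nxt
--         lang = char_langs[i]
--         if lang is not None and lang != "cjk":
--             nxt = lang
--     out = []
--     prev = None
--     for lang, nx in zip(char_langs, next_lang):
--         if lang != "cjk":
--             out.append(lang)
--             if lang is not None:
--                 prev = lang
--             continue
--         if prev == "ja" or nx == "ja":
--             r = "ja"
--         elif prev == "ko" or nx == "ko":
--             r = "ko"
--         elif primary_language in ("zh", "ja", "ko"):
--             r = primary_language
--         else:
--             r = "zh"
--         out.append(r)
--         prev = r
--     return out
-- ===== Notes on version B (the rewrite author's own statement) =====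
-- stated objective: alternative
-- what changed: Replaced A's per-'cjk'-character linear backward/forward neighbor scans with one backward pass precomputing each position's next classified language and one forward pass carrying the previous resolved language.
import Mathlib
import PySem

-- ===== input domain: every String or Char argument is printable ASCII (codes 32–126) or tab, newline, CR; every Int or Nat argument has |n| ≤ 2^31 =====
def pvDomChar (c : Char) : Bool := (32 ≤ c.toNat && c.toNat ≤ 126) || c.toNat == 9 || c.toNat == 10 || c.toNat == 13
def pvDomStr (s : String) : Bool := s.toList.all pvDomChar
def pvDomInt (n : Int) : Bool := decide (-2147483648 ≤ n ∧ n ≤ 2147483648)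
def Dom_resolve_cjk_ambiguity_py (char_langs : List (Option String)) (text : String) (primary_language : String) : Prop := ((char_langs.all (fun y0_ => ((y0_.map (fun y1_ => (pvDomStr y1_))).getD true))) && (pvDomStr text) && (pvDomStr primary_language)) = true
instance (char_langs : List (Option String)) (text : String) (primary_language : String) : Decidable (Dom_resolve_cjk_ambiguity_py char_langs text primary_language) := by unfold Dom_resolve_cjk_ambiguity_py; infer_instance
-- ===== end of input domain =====

-- B replaces A's per-"cjk" linear neighbour scans by one backward pass
-- precomputing the next classified language and one forward pass carrying the
-- previous resolved language; objective: alternative algorithm, same return value.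

-- ===== PORT A =====
-- the inner `for j in range(i-1,-1,-1)` / `for j in range(i+1,n)` scans with break:
-- first element of the reversed prefix / of the suffix satisfying the condition
def pvA_pred (x : Option String) : Bool := x.isSome && x != some "cjk"

-- one iteration of A's outer loop at index i, acting on the current resolved list
def pvA_step (primary_language : String) (resolved : List (Option String)) (i : Nat) : List (Option String) :=
  if resolved.getD i none != some "cjk" then resolved
  else
    let prev_lang := ((resolved.take i).reverse.find? pvA_pred).join
    let next_lang := ((resolved.drop (i + 1)).find? pvA_pred).join
    let v : String :=
      if prev_lang = some "ja" ∨ next_lang = some "ja" then "ja"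
      else if prev_lang = some "ko" ∨ next_lang = some "ko" then "ko"
      else if primary_language = "zh" ∨ primary_language = "ja" ∨ primary_language = "ko" then primary_language
      else "zh"
    resolved.set i (some v)

def resolve_cjk_ambiguity_py (char_langs : List (Option String)) (text : String) (primary_language : String) : List (Option String) :=
  (List.range char_langs.length).foldl (pvA_step primary_language) char_langs

-- ===== PORT B =====
-- backward pass: pairs (nxt so far, next_lang list built back-to-front)
def pvB_pred (lang : Option String) : Bool := lang.isSome && lang != some "cjk"

def pvB_next (char_langs : List (Option String)) : List (Option String) :=
  (char_langs.foldr
    (fun lang (p : Option String × List (Option String)) =>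
      (if pvB_pred lang then lang else p.1, p.1 :: p.2))
    (none, [])).2

-- forward pass over (lang, next_lang) pairs carrying prev
def pvB_go (primary_language : String) : Option String → List (Option String × Option String) → List (Option String)
  | _, [] => []
  | prev, (lang, nx) :: rest =>
    if lang != some "cjk" then
      lang :: pvB_go primary_language (if lang.isSome then lang else prev) rest
    else
      let r : String :=
        if prev = some "ja" ∨ nx = some "ja" then "ja"
        else if prev = some "ko" ∨ nx = some "ko" then "ko"
        else if primary_language = "zh" ∨ primary_language = "ja" ∨ primary_language = "ko" then primary_language
        else "zh"
      some r :: pvB_go primary_language (some r) rest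

def resolve_cjk_ambiguity_py_alt (char_langs : List (Option String)) (text : String) (primary_language : String) : List (Option String) :=
  pvB_go primary_language none (char_langs.zip (pvB_next char_langs))

-- ===== PRECONDITION & SPEC =====
def Spec_resolve_cjk_ambiguity_py (char_langs : List (Option String)) (text : String) (primary_language : String) (out : List (Option String)) : Prop := out = resolve_cjk_ambiguity_py_alt char_langs text primary_language
instance (char_langs : List (Option String)) (text : String) (primary_language : String) (out : List (Option String)) : Decidable (Spec_resolve_cjk_ambiguity_py char_langs text primary_language out) := by unfold Spec_resolve_cjk_ambiguity_py; infer_instance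

-- ===== CLAIM (what is proved, stated in full; the proofs are below) =====
def Claim_equal_resolve_cjk_ambiguity_py : Prop := ∀ (char_langs : List (Option String)) (text : String) (primary_language : String), Dom_resolve_cjk_ambiguity_py char_langs text primary_language → Spec_resolve_cjk_ambiguity_py char_langs text primary_language (resolve_cjk_ambiguity_py char_langs text primary_language)

-- ===== LEMMAS AND PROOFS =====

-- element at the seam of an append
lemma pvGetD_mid (l₁ l₂ : List (Option String)) (x : Option String) :
    (l₁ ++ x :: l₂).getD l₁.length none = x := by
  induction l₁ with
  | nil => rfl
  | cons a t ih => simpa using ih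

-- set at the seam of an append
lemma pvSet_mid (l₁ l₂ : List (Option String)) (x v : Option String) :
    (l₁ ++ x :: l₂).set l₁.length v = l₁ ++ v :: l₂ := by
  induction l₁ with
  | nil => rfl
  | cons a t ih => simpa using ih

-- on a list without "cjk", A's neighbour predicate is just isSome
lemma pvFind_noCjk (l : List (Option String)) (h : some "cjk" ∉ l) :
    l.find? pvA_pred = l.find? (fun x => x.isSome) := by
  induction l with
  | nil => rfl
  | cons a t ih =>
    have ha : a ≠ some "cjk" := fun e => h (e ▸ List.mem_cons_self)
    have ht := ih (fun m => h (List.mem_cons_of_mem _ m))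
    cases a with
    | none => simpa [List.find?, pvA_pred] using ht
    | some s =>
      have : (some s != some "cjk") = true := by
        simp [bne_iff_ne]; intro e; exact ha (by rw [e])
      simp [List.find?, pvA_pred, this]

-- "last classified language of the prefix" after appending one element
lemma pvLast_snoc (pre : List (Option String)) (x : Option String) :
    (((pre ++ [x]).reverse.find? (fun y => y.isSome)).join)
      = if x.isSome then x else ((pre.reverse.find? (fun y => y.isSome)).join) := by
  cases x <;> simp [List.find?]

-- A's and B's "classified language" predicates are the same function
lemma pvPred_eq : pvB_pred = pvA_pred := rfl

-- first component of B's backward fold = first classified language of the list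
lemma pvB_fold_fst (l : List (Option String)) :
    (l.foldr
      (fun lang (p : Option String × List (Option String)) =>
        (if pvB_pred lang then lang else p.1, p.1 :: p.2))
      (none, [])).1 = (l.find? pvB_pred).join := by
  induction l with
  | nil => rfl
  | cons a t ih =>
    simp only [List.foldr_cons, List.find?_cons]
    cases h : pvB_pred a with
    | false => simp [h, ih]
    | true =>
      cases a with
      | none => simp [pvB_pred] at h
      | some s => simp [h]

lemma pvB_next_cons (a : Option String) (t : List (Option String)) :
    pvB_next (a :: t) = (t.find? pvA_pred).join :: pvB_next t := by
  have h : (t.foldr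
      (fun lang (p : Option String × List (Option String)) =>
        (if pvB_pred lang then lang else p.1, p.1 :: p.2))
      (none, [])).1 = (t.find? pvA_pred).join := by
    rw [← pvPred_eq]; exact pvB_fold_fst t
  simp [pvB_next, h]

-- the resolved replacement value is never "cjk"
lemma pvV_ne_cjk (primary_language : String) (prev nx : Option String) :
    (if prev = some "ja" ∨ nx = some "ja" then "ja"
     else if prev = some "ko" ∨ nx = some "ko" then "ko"
     else if primary_language = "zh" ∨ primary_language = "ja" ∨ primary_language = "ko" then primary_language
     else "zh") ≠ "cjk" := by
  split_ifs with h1 h2 h3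
  · decide
  · decide
  · rcases h3 with h | h | h <;> subst h <;> decide
  · decide

-- MAIN invariant: after the first `pre.length` iterations of A's loop the list is
-- `pre ++ suf` with `pre` fully resolved (no "cjk"), and the remaining iterations
-- produce exactly B's forward pass continued with prev = last classified of pre.
lemma pvMain (suf : List (Option String)) : ∀ (pre : List (Option String)) (primary_language : String),
    some "cjk" ∉ pre →
    (List.range' pre.length suf.length 1).foldl (pvA_step primary_language) (pre ++ suf)
      = pre ++ pvB_go primary_language ((pre.reverse.find? (fun y => y.isSome)).join)
          (suf.zip (pvB_next suf)) := by
  induction suf with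
  | nil => intro pre p h; simp [pvB_go]
  | cons x rest ih =>
    intro pre p h
    rw [pvB_next_cons, List.zip_cons_cons, List.length_cons, List.range'_succ, List.foldl_cons]
    by_cases hx : x = some "cjk"
    · subst hx
      -- A resolves index pre.length
      have hget : (pre ++ some "cjk" :: rest).getD pre.length none = some "cjk" := pvGetD_mid _ _ _
      have hprev : ((pre ++ some "cjk" :: rest).take pre.length) = pre := by
        simpa using List.take_left pre (some "cjk" :: rest)
      have hdrop : ((pre ++ some "cjk" :: rest).drop (pre.length + 1)) = rest := by
        have : pre ++ some "cjk" :: rest = (pre ++ [some "cjk"]) ++ rest := by simp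
        rw [this]
        simpa using List.drop_left (pre ++ [some "cjk"]) rest
      have hfind : pre.reverse.find? pvA_pred = pre.reverse.find? (fun y => y.isSome) :=
        pvFind_noCjk _ (by simpa using h)
      set prev := ((pre.reverse.find? (fun y => y.isSome)).join) with hprevdef
      set nx := ((rest.find? pvA_pred).join) with hnxdef
      set v : String :=
        (if prev = some "ja" ∨ nx = some "ja" then "ja"
         else if prev = some "ko" ∨ nx = some "ko" then "ko"
         else if p = "zh" ∨ p = "ja" ∨ p = "ko" then p
         else "zh") with hvdef
      have hstep : pvA_step p (pre ++ some "cjk" :: rest) pre.length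
          = pre ++ some v :: rest := by
        rw [pvA_step, hget]
        simp only [bne_self_eq_false, Bool.false_eq_true, if_false, hprev, hdrop, hfind]
        rw [pvSet_mid]
      rw [hstep]
      -- B's step
      have hB : pvB_go p prev ((some "cjk", nx) :: rest.zip (pvB_next rest))
          = some v :: pvB_go p (some v) (rest.zip (pvB_next rest)) := by
        simp [pvB_go, hvdef]
      rw [hB]
      have h' : some "cjk" ∉ pre ++ [some v] := by
        intro hm
        rcases List.mem_append.mp hm with hm | hm
        · exact h hm
        · simp at hm; exact pvV_ne_cjk p prev nx hm.symm
      have := ih (pre ++ [some v]) p h'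
      simp only [List.length_append, List.length_cons, List.length_nil, Nat.zero_add,
        List.append_assoc, List.singleton_append] at this
      have hlast : (((pre ++ [some v]).reverse.find? (fun y => y.isSome)).join) = some v := by
        rw [pvLast_snoc]; rfl
      rw [hlast] at this
      exact this
    · -- A skips this index
      have hget : (pre ++ x :: rest).getD pre.length none = x := pvGetD_mid _ _ _
      have hbne : (x != some "cjk") = true := by simpa [bne_iff_ne] using hx
      have hstep : pvA_step p (pre ++ x :: rest) pre.length = pre ++ x :: rest := by
        rw [pvA_step, hget, hbne]; rfl
      rw [hstep]
      have hB : pvB_go p ((pre.reverse.find? (fun y => y.isSome)).join)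
            ((x, (rest.find? pvA_pred).join) :: rest.zip (pvB_next rest))
          = x :: pvB_go p (if x.isSome then x else ((pre.reverse.find? (fun y => y.isSome)).join))
              (rest.zip (pvB_next rest)) := by
        simp [pvB_go, hbne]
      rw [hB]
      have h' : some "cjk" ∉ pre ++ [x] := by
        intro hm
        rcases List.mem_append.mp hm with hm | hm
        · exact h hm
        · simp at hm; exact hx hm.symm
      have := ih (pre ++ [x]) p h'
      simp only [List.length_append, List.length_cons, List.length_nil, Nat.zero_add,
        List.append_assoc, List.singleton_append] at this
      rw [pvLast_snoc] at this
      exact this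

-- ===== VERDICT (by name: the statement is the Claim_ definition above) =====
theorem resolve_cjk_ambiguity_py_spec : Claim_equal_resolve_cjk_ambiguity_py := by
  intro char_langs text primary_language _
  unfold Spec_resolve_cjk_ambiguity_py resolve_cjk_ambiguity_py resolve_cjk_ambiguity_py_alt
  have := pvMain char_langs [] primary_language (by simp)
  simpa [List.range_eq_range'] using this
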